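-- pv_equiv track=rewrite | github.com/jkallich/Python-Course | src/Hangman/Hangman.py | make_dashes
-- ===== SOURCE A (Python) =====
-- def make_dashes(text):
--     text = text.split()
--     dashes = []
--     for word in text:
--         dashes.append('_'*(len(word)))
--     dashes_string = ' '.join(dashes)
--
--     final_dashes = []
--     for part in dashes_string:
--         final_dashes.append(part)
--
--     return final_dashes
-- ===== SOURCE B (Python) =====
-- def make_dashes(text):
--     words = text.split()
--     if not words:
--         return []
--     result = ['_'] * len(words[0])
--     for word in words[1:]:
--         result.append(' ')
--         result += ['_'] * len(word)
--     return result
-- ===== Notes on version B (the rewrite author's own statement) =====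
-- stated objective: simpler
-- what changed: B builds the output character list directly from the word lengths in one pass (replicated '_' blocks with a ' ' between words), eliminating A's intermediate dash strings, the ' '.join, and the re-iteration over the joined string's characters.
import Mathlib
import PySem

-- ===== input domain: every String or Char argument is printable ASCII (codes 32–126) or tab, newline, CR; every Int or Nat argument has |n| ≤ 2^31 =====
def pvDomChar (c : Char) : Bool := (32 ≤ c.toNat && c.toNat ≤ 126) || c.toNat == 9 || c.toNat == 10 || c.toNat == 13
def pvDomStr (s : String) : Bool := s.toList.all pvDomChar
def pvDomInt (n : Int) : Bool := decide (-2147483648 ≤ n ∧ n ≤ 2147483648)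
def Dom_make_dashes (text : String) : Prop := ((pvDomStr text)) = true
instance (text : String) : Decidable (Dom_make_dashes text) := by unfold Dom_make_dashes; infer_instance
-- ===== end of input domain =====

-- B builds the output list directly from word lengths in one pass, dropping A's
-- intermediate dash strings, ' '.join and character re-iteration (objective: simpler).


-- ===== PORT A =====
-- literal port of A: split, build '_'*len(word) strings, ' '.join, then list the characters
def make_dashes (text : String) : List String :=
  let ws := PySem.Str.split₀ text
  let dashes := ws.foldl (fun acc w => acc ++ [String.ofList (List.replicate w.toList.length '_')]) []
  let dashes_string := PySem.Str.join " " dashes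
  dashes_string.toList.foldl (fun acc c => acc ++ [String.ofList [c]]) []

-- ===== PORT B =====
-- port of B: one pass over the words, '_' blocks with a ' ' between consecutive words
def make_dashes_alt (text : String) : List String :=
  match PySem.Str.split₀ text with
  | [] => []
  | w :: ws =>
      ws.foldl (fun acc w' => acc ++ [" "] ++ List.replicate w'.toList.length "_")
        (List.replicate w.toList.length "_")

-- ===== PRECONDITION & SPEC =====
def Spec_make_dashes (text : String) (out : List String) : Prop := out = make_dashes_alt text
instance (text : String) (out : List String) : Decidable (Spec_make_dashes text out) := by unfold Spec_make_dashes; infer_instance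

-- ===== CLAIM (what is proved, stated in full; the proofs are below) =====
def Claim_equal_make_dashes : Prop := ∀ (text : String), Dom_make_dashes text → Spec_make_dashes text (make_dashes text)

-- ===== LEMMAS AND PROOFS =====

theorem pv_foldl_snoc {α β : Type} (f : α → β) (l : List α) (init : List β) :
    l.foldl (fun acc x => acc ++ [f x]) init = init ++ l.map f := by
  induction l generalizing init with
  | nil => simp
  | cons x xs ih => simp [List.foldl_cons, ih, List.append_assoc]

theorem pv_foldl_b {β : Type} (f : β → List String) (l : List β) (init : List String) :
    l.foldl (fun acc w' => acc ++ [" "] ++ f w') init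
      = init ++ l.flatMap (fun w' => " " :: f w') := by
  induction l generalizing init with
  | nil => simp
  | cons x xs ih => simp [List.foldl_cons, List.append_assoc, List.flatMap]

theorem pv_singleton_underscore : String.ofList ['_'] = "_" := by decide

theorem pv_singleton_space : String.ofList [' '] = " " := by decide

theorem pv_join_map (w : String) (ws : List String) :
    (PySem.Chars.join [' ']
        (((w :: ws).map (fun v => String.ofList (List.replicate v.toList.length '_'))).map
          String.toList)).map (fun c => String.ofList [c])
      = List.replicate w.toList.length "_"
        ++ ws.flatMap (fun v => " " :: List.replicate v.toList.length "_") := by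
  induction ws generalizing w with
  | nil =>
      simp [PySem.Chars.join_singleton, List.map_replicate, pv_singleton_underscore]
  | cons v vs ih =>
      simp only [List.map_cons] at *
      rw [PySem.Chars.join_cons_cons]
      simp only [List.map_append, ih v]
      simp [List.map_replicate, List.append_assoc, pv_singleton_underscore, pv_singleton_space]

-- ===== VERDICT (by name: the statement is the Claim_ definition above) =====
theorem make_dashes_spec : Claim_equal_make_dashes := by
  intro text _
  unfold Spec_make_dashes make_dashes make_dashes_alt
  cases h : PySem.Str.split₀ text with
  | nil => simp [PySem.Str.join]
  | cons w ws =>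
      simp only [pv_foldl_snoc, pv_foldl_b, List.nil_append]
      have hj := PySem.Str.toList_join " "
        ((w :: ws).map (fun v => String.ofList (List.replicate v.toList.length '_')))
      rw [show (" " : String).toList = [' '] from rfl] at hj
      rw [hj]
      exact pv_join_map w ws
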